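-- pv_equiv track=rewrite | github.com/Bohdan-Stets/lab7 | lab7/lab7.2.py | find_min_max_rows
-- ===== SOURCE A (Python) =====
-- def find_min_max_rows(matrix):
--     min_val = float('inf')
--     max_val = float('-inf')
--     min_row_idx = max_row_idx = 0
--
--     for i in range(len(matrix)):
--         for j in range(len(matrix[i])):
--             if matrix[i][j] < min_val:
--                 min_val = matrix[i][j]
--                 min_row_idx = i
--             if matrix[i][j] > max_val:
--                 max_val = matrix[i][j]
--                 max_row_idx = i
--     return min_row_idx, max_row_idx
-- ===== SOURCE B (Python) =====
-- def find_min_max_rows(matrix):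
--     # Two-stage: first compute the global min/max VALUES over the flattened
--     # matrix, then locate the first row CONTAINING each value.
--     vals = [x for row in matrix for x in row]
--     if not vals:
--         return 0, 0
--     lo = min(vals)
--     hi = max(vals)
--     imin = next(i for i, row in enumerate(matrix) if lo in row)
--     imax = next(i for i, row in enumerate(matrix) if hi in row)
--     return imin, imax
-- ===== Notes on version B (the rewrite author's own statement) =====
-- stated objective: alternative
-- what changed: Replaces A's single element-wise scan with running argmin/argmax state by a staged algorithm: flatten the matrix, take the global min/max values with the builtins, then search for the first row containing each value by membership test.
import Mathlib
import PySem

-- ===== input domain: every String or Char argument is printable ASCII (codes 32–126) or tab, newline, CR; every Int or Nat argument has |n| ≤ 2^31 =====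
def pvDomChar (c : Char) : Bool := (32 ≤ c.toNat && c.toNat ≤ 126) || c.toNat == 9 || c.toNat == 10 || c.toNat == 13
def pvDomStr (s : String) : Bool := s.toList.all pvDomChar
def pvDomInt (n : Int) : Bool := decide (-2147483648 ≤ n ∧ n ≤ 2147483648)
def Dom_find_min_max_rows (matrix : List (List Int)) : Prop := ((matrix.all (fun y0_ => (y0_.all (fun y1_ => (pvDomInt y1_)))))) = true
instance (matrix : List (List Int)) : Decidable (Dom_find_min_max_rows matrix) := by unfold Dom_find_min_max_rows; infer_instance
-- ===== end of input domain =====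

-- B replaces A's single element-wise scan (running argmin/argmax state) by a staged
-- algorithm: flatten, take global min/max values, then find the first row containing each.

-- ===== PORT A =====
-- state components: running min value as Option ('none' plays float('inf')), and its row index
def pvStepMinA (i : Int) (s : Option Int × Int) (x : Int) : Option Int × Int :=
  match s.1 with
  | none => (some x, i)
  | some v => if x < v then (some x, i) else s

def pvStepMaxA (i : Int) (s : Option Int × Int) (x : Int) : Option Int × Int :=
  match s.1 with
  | none => (some x, i)
  | some v => if v < x then (some x, i) else s

def find_min_max_rows (matrix : List (List Int)) : Int × Int :=
  let s := (PySem.List.enumerate matrix).foldl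
    (fun s p => p.2.foldl (fun t x => (pvStepMinA p.1 t.1 x, pvStepMaxA p.1 t.2 x)) s)
    ((none, 0), (none, 0))
  (s.1.2, s.2.2)

-- ===== PORT B =====
-- port of 'next(i for i, row in enumerate(matrix) if v in row)'; the [] case is
-- unreachable in B (v always occurs in some row), 0 stands for the absent StopIteration
def pvFirstRow (v : Int) (rows : List (List Int)) (i : Int) : Int :=
  match rows with
  | [] => 0
  | r :: t => if r.contains v then i else pvFirstRow v t (i + 1)

def find_min_max_rows_alt (matrix : List (List Int)) : Int × Int :=
  let vals := matrix.flatMap (fun row => row)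
  match PySem.List.min? vals (fun y => y), PySem.List.max? vals (fun y => y) with
  | some lo, some hi => (pvFirstRow lo matrix 0, pvFirstRow hi matrix 0)
  | _, _ => (0, 0)

-- ===== PRECONDITION & SPEC =====
def Spec_find_min_max_rows (matrix : List (List Int)) (out : Int × Int) : Prop := out = find_min_max_rows_alt matrix
instance (matrix : List (List Int)) (out : Int × Int) : Decidable (Spec_find_min_max_rows matrix out) := by unfold Spec_find_min_max_rows; infer_instance

-- ===== CLAIM (what is proved, stated in full; the proofs are below) =====
def Claim_equal_find_min_max_rows : Prop := ∀ (matrix : List (List Int)), Dom_find_min_max_rows matrix → Spec_find_min_max_rows matrix (find_min_max_rows matrix)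

-- ===== LEMMAS AND PROOFS =====

lemma pv_foldl_min_eq (l : List Int) (x y : Int) :
    l.foldl min (min x y) = min x (l.foldl min y) := by
  induction l generalizing y with
  | nil => simp
  | cons a t ih => simp only [List.foldl_cons, min_assoc, ih]

lemma pv_foldl_max_eq (l : List Int) (x y : Int) :
    l.foldl max (max x y) = max x (l.foldl max y) := by
  induction l generalizing y with
  | nil => simp
  | cons a t ih => simp only [List.foldl_cons, max_assoc, ih]

lemma pv_foldl_min_mem (xs : List Int) (x : Int) : xs.foldl min x ∈ x :: xs := by
  induction xs generalizing x with
  | nil => simp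
  | cons y t ih =>
    simp only [List.foldl_cons]
    have h := ih (min x y)
    rw [List.mem_cons] at h
    rcases h with h | h
    · rw [h]; rcases min_cases x y with ⟨h2, _⟩ | ⟨h2, _⟩ <;> simp [h2]
    · simp [h]

lemma pv_foldl_min_le (xs : List Int) (x : Int) : ∀ y ∈ x :: xs, xs.foldl min x ≤ y := by
  induction xs generalizing x with
  | nil => simp
  | cons z t ih =>
    intro y hy
    simp only [List.foldl_cons]
    have h := ih (min x z)
    rw [List.mem_cons, List.mem_cons] at hy
    rcases hy with h1 | h1 | h1
    · rw [h1]; exact le_trans (h (min x z) (by simp)) (min_le_left _ _)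
    · rw [h1]; exact le_trans (h (min x z) (by simp)) (min_le_right _ _)
    · exact h y (by simp [h1])

lemma pv_foldl_max_mem (xs : List Int) (x : Int) : xs.foldl max x ∈ x :: xs := by
  induction xs generalizing x with
  | nil => simp
  | cons y t ih =>
    simp only [List.foldl_cons]
    have h := ih (max x y)
    rw [List.mem_cons] at h
    rcases h with h | h
    · rw [h]; rcases max_cases x y with ⟨h2, _⟩ | ⟨h2, _⟩ <;> simp [h2]
    · simp [h]

lemma pv_foldl_max_ge (xs : List Int) (x : Int) : ∀ y ∈ x :: xs, y ≤ xs.foldl max x := by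
  induction xs generalizing x with
  | nil => simp
  | cons z t ih =>
    intro y hy
    simp only [List.foldl_cons]
    have h := ih (max x z)
    rw [List.mem_cons, List.mem_cons] at hy
    rcases hy with h1 | h1 | h1
    · rw [h1]; exact le_trans (le_max_left _ _) (h (max x z) (by simp))
    · rw [h1]; exact le_trans (le_max_right _ _) (h (max x z) (by simp))
    · exact h y (by simp [h1])

lemma pv_min_row (i : Int) (t : List Int) (x : Int) (s : Option Int × Int) :
    (x :: t).foldl (pvStepMinA i) s =
      (if s.1.elim true (fun v => decide (t.foldl min x < v)) then (some (t.foldl min x), i) else s) := by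
  induction t generalizing x s with
  | nil =>
    simp only [List.foldl_cons, List.foldl_nil, pvStepMinA]
    cases h : s.1 with
    | none => simp
    | some v => simp only [h]; split_ifs <;> simp_all <;> omega
  | cons y t ih =>
    have hfold : (y :: t).foldl min x = min x (t.foldl min y) := by
      simpa using pv_foldl_min_eq t x y
    rw [show (x :: y :: t).foldl (pvStepMinA i) s = (y :: t).foldl (pvStepMinA i) (pvStepMinA i s x) from rfl,
        ih, hfold]
    cases h : s.1 with
    | none =>
      simp only [pvStepMinA, h, Option.elim]
      split_ifs with h1 h2 <;> simp_all <;> omega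
    | some v =>
      simp only [pvStepMinA, h, Option.elim]
      rcases min_cases x (t.foldl min y) with ⟨hmin, hc⟩ | ⟨hmin, hc⟩ <;>
        rw [hmin] <;> split_ifs <;> simp_all <;> omega

lemma pv_max_row (i : Int) (t : List Int) (x : Int) (s : Option Int × Int) :
    (x :: t).foldl (pvStepMaxA i) s =
      (if s.1.elim true (fun v => decide (v < t.foldl max x)) then (some (t.foldl max x), i) else s) := by
  induction t generalizing x s with
  | nil =>
    simp only [List.foldl_cons, List.foldl_nil, pvStepMaxA]
    cases h : s.1 with
    | none => simp
    | some v => simp only [h]; split_ifs <;> simp_all <;> omega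
  | cons y t ih =>
    have hfold : (y :: t).foldl max x = max x (t.foldl max y) := by
      simpa using pv_foldl_max_eq t x y
    rw [show (x :: y :: t).foldl (pvStepMaxA i) s = (y :: t).foldl (pvStepMaxA i) (pvStepMaxA i s x) from rfl,
        ih, hfold]
    cases h : s.1 with
    | none =>
      simp only [pvStepMaxA, h, Option.elim]
      split_ifs with h1 h2 <;> simp_all <;> omega
    | some v =>
      simp only [pvStepMaxA, h, Option.elim]
      rcases max_cases x (t.foldl max y) with ⟨hmax, hc⟩ | ⟨hmax, hc⟩ <;>
        rw [hmax] <;> split_ifs <;> simp_all <;> omega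

-- the characterisation A's min-side fold is proved equal to
def pvMinSpec (rows : List (List Int)) (k : Int) (s : Option Int × Int) : Option Int × Int :=
  match PySem.List.min? (rows.flatMap (fun r => r)) (fun y => y) with
  | none => s
  | some m => if s.1.elim true (fun v => decide (m < v)) then (some m, pvFirstRow m rows k) else s

def pvMaxSpec (rows : List (List Int)) (k : Int) (s : Option Int × Int) : Option Int × Int :=
  match PySem.List.max? (rows.flatMap (fun r => r)) (fun y => y) with
  | none => s
  | some m => if s.1.elim true (fun v => decide (v < m)) then (some m, pvFirstRow m rows k) else s

lemma pv_minfold (rows : List (List Int)) (k : Int) (s : Option Int × Int) :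
    (PySem.List.enumerate rows k).foldl (fun a p => p.2.foldl (pvStepMinA p.1) a) s
      = pvMinSpec rows k s := by
  induction rows generalizing k s with
  | nil => simp [pvMinSpec, PySem.List.min?]
  | cons r t ih =>
    rw [PySem.List.enumerate_cons, List.foldl_cons]
    simp only
    cases r with
    | nil =>
      rw [List.foldl_nil, ih]
      simp [pvMinSpec, pvFirstRow]
    | cons x xs =>
      rw [pv_min_row, ih]
      set a := xs.foldl min x with ha
      have hamem : a ∈ x :: xs := pv_foldl_min_mem xs x
      have hale : ∀ y ∈ x :: xs, a ≤ y := pv_foldl_min_le xs x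
      have hflat : ((x :: xs) :: t).flatMap (fun r => r) = x :: (xs ++ t.flatMap (fun r => r)) := by simp
      cases hft : t.flatMap (fun r => r) with
      | nil =>
        have hm : PySem.List.min? (((x :: xs) :: t).flatMap (fun r => r)) (fun y => y) = some a := by
          rw [hflat, hft, List.append_nil, PySem.List.min?_id_cons]
        have hcr : (x :: xs).contains a = true := by
          simp only [List.contains_iff_mem]; exact hamem
        have hb : PySem.List.min? (t.flatMap (fun r => r)) (fun y => y) = none := by
          rw [hft]; rfl
        simp only [pvMinSpec, hm, hb, pvFirstRow, hcr, if_pos]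
      | cons y ys =>
        have hb : PySem.List.min? (t.flatMap (fun r => r)) (fun y => y) = some (ys.foldl min y) := by
          rw [hft, PySem.List.min?_id_cons]
        set b := ys.foldl min y with hbdef
        have hbmem : b ∈ y :: ys := pv_foldl_min_mem ys y
        have hm : PySem.List.min? (((x :: xs) :: t).flatMap (fun y => y)) (fun y => y) = some (min a b) := by
          rw [hflat, hft, PySem.List.min?_id_cons, List.foldl_append, ← ha, List.foldl_cons]
          have := pv_foldl_min_eq ys a y
          rw [this, hbdef]
        simp only [pvMinSpec, hb, hm]
        by_cases hab : a ≤ b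
        · -- min is a, found in row r
          have hcr : (x :: xs).contains a = true := by
            simp only [List.contains_iff_mem]; exact hamem
          have hmin : min a b = a := min_eq_left hab
          have hfr : pvFirstRow a ((x :: xs) :: t) k = k := by unfold pvFirstRow; rw [hcr]; simp
          rw [hmin, hfr]
          cases h : s.1 with
          | none => simp [h]; omega
          | some v =>
            by_cases hav : a < v
            · simp [h, hav]; omega
            · simp [h, hav]; intro hbv; omega
        · -- min is b, not in row r
          replace hab : b < a := by omega
          have hcr : (x :: xs).contains b = false := by
            rw [Bool.eq_false_iff]
            intro hc
            have hmem : b ∈ x :: xs := by simpa using hc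
            exact absurd (hale b hmem) (by omega)
          have hmin : min a b = b := min_eq_right (le_of_lt hab)
          have hfr : pvFirstRow b ((x :: xs) :: t) k = pvFirstRow b t (k + 1) := by
            rw [show pvFirstRow b ((x :: xs) :: t) k
                  = if (x :: xs).contains b then k else pvFirstRow b t (k + 1) from rfl, hcr]
            simp
          rw [hmin, hfr]
          cases h : s.1 with
          | none => simp [h]; omega
          | some v =>
            by_cases hav : a < v
            · have hbv : b < v := by omega
              simp [h, hav, hab, hbv]
            · simp [h, hav]

lemma pv_maxfold (rows : List (List Int)) (k : Int) (s : Option Int × Int) :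
    (PySem.List.enumerate rows k).foldl (fun a p => p.2.foldl (pvStepMaxA p.1) a) s
      = pvMaxSpec rows k s := by
  induction rows generalizing k s with
  | nil => simp [pvMaxSpec, PySem.List.max?]
  | cons r t ih =>
    rw [PySem.List.enumerate_cons, List.foldl_cons]
    simp only
    cases r with
    | nil =>
      rw [List.foldl_nil, ih]
      simp [pvMaxSpec, pvFirstRow]
    | cons x xs =>
      rw [pv_max_row, ih]
      set a := xs.foldl max x with ha
      have hamem : a ∈ x :: xs := pv_foldl_max_mem xs x
      have hage : ∀ y ∈ x :: xs, y ≤ a := pv_foldl_max_ge xs x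
      have hflat : ((x :: xs) :: t).flatMap (fun r => r) = x :: (xs ++ t.flatMap (fun r => r)) := by simp
      cases hft : t.flatMap (fun r => r) with
      | nil =>
        have hm : PySem.List.max? (((x :: xs) :: t).flatMap (fun r => r)) (fun y => y) = some a := by
          rw [hflat, hft, List.append_nil, PySem.List.max?_id_cons]
        have hcr : (x :: xs).contains a = true := by
          simp only [List.contains_iff_mem]; exact hamem
        have hb : PySem.List.max? (t.flatMap (fun r => r)) (fun y => y) = none := by
          rw [hft]; rfl
        simp only [pvMaxSpec, hm, hb, pvFirstRow, hcr, if_pos]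
      | cons y ys =>
        have hb : PySem.List.max? (t.flatMap (fun r => r)) (fun y => y) = some (ys.foldl max y) := by
          rw [hft, PySem.List.max?_id_cons]
        set b := ys.foldl max y with hbdef
        have hbmem : b ∈ y :: ys := pv_foldl_max_mem ys y
        have hm : PySem.List.max? (((x :: xs) :: t).flatMap (fun y => y)) (fun y => y) = some (max a b) := by
          rw [hflat, hft, PySem.List.max?_id_cons, List.foldl_append, ← ha, List.foldl_cons]
          have := pv_foldl_max_eq ys a y
          rw [this, hbdef]
        simp only [pvMaxSpec, hb, hm]
        by_cases hab : b ≤ a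
        · have hcr : (x :: xs).contains a = true := by
            simp only [List.contains_iff_mem]; exact hamem
          have hmax : max a b = a := max_eq_left hab
          have hfr : pvFirstRow a ((x :: xs) :: t) k = k := by unfold pvFirstRow; rw [hcr]; simp
          rw [hmax, hfr]
          cases h : s.1 with
          | none => simp [h]; omega
          | some v =>
            by_cases hav : v < a
            · simp [h, hav]; omega
            · simp [h, hav]; intro hbv; omega
        · replace hab : a < b := by omega
          have hcr : (x :: xs).contains b = false := by
            rw [Bool.eq_false_iff]
            intro hc
            have hmem : b ∈ x :: xs := by simpa using hc
            exact absurd (hage b hmem) (by omega)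
          have hmax : max a b = b := max_eq_right (le_of_lt hab)
          have hfr : pvFirstRow b ((x :: xs) :: t) k = pvFirstRow b t (k + 1) := by
            rw [show pvFirstRow b ((x :: xs) :: t) k
                  = if (x :: xs).contains b then k else pvFirstRow b t (k + 1) from rfl, hcr]
            simp
          rw [hmax, hfr]
          cases h : s.1 with
          | none => simp [h]; omega
          | some v =>
            by_cases hav : v < a
            · have hbv : v < b := by omega
              simp [h, hav, hab, hbv]
            · simp [h, hav]

lemma pv_split_fold (matrix : List (List Int)) :
    (PySem.List.enumerate matrix).foldl
      (fun s p => p.2.foldl (fun t x => (pvStepMinA p.1 t.1 x, pvStepMaxA p.1 t.2 x)) s)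
      ((none, 0), (none, 0))
    = ((PySem.List.enumerate matrix).foldl (fun a p => p.2.foldl (pvStepMinA p.1) a) (none, 0),
       (PySem.List.enumerate matrix).foldl (fun a p => p.2.foldl (pvStepMaxA p.1) a) (none, 0)) := by
  have hstep : (fun (s : (Option Int × Int) × (Option Int × Int)) (p : Int × List Int) =>
      p.2.foldl (fun t x => (pvStepMinA p.1 t.1 x, pvStepMaxA p.1 t.2 x)) s)
      = fun s p => (p.2.foldl (pvStepMinA p.1) s.1, p.2.foldl (pvStepMaxA p.1) s.2) := by
    funext s p
    obtain ⟨a, b⟩ := s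
    rw [PySem.List.foldl_prod_mk (f := pvStepMinA p.1) (g := pvStepMaxA p.1)]
  rw [hstep]
  exact PySem.List.foldl_prod_mk
    (fun (a : Option Int × Int) (p : Int × List Int) => List.foldl (pvStepMinA p.1) a p.2)
    (fun (a : Option Int × Int) (p : Int × List Int) => List.foldl (pvStepMaxA p.1) a p.2) _ _ _

theorem find_min_max_rows_spec : Claim_equal_find_min_max_rows := by
  intro matrix _
  simp only [Spec_find_min_max_rows, find_min_max_rows, find_min_max_rows_alt]
  rw [pv_split_fold, pv_minfold, pv_maxfold]
  unfold pvMinSpec pvMaxSpec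
  cases hmin : PySem.List.min? (matrix.flatMap (fun r => r)) (fun y => y) with
  | none =>
    have hnil : matrix.flatMap (fun r => r) = [] := (PySem.List.min?_eq_none_iff _ _).mp hmin
    have hmax : PySem.List.max? (matrix.flatMap (fun r => r)) (fun y => y) = none := by
      rw [(PySem.List.max?_eq_none_iff _ _)]; exact hnil
    simp only [hmin, hmax]
  | some lo =>
    have hne : matrix.flatMap (fun r => r) ≠ [] := by
      intro h
      rw [(PySem.List.min?_eq_none_iff _ _).mpr h] at hmin; simp at hmin
    cases hmax : PySem.List.max? (matrix.flatMap (fun r => r)) (fun y => y) with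
    | none => exact absurd ((PySem.List.max?_eq_none_iff _ _).mp hmax) hne
    | some hi => simp only [hmin, hmax]; simp
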